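-- pv_equiv track=rewrite | github.com/muneebaifrah/Unstop-100-Days-Coding-Sprint | Day-64/3.Digital_Safe_Vault.py | min_time_to_transform
-- ===== SOURCE A (Python) =====
-- def min_time_to_transform(currentState, desiredState, alterablePositions):
--     n = len(currentState)
--
--     # Validation checks
--     if n != len(desiredState) or n != len(alterablePositions):
--         return -1
--     if not all(c.islower() for c in currentState):
--         return -1
--     if not all(c.islower() for c in desiredState):
--         return -1
--     if not all(c in '01' for c in alterablePositions):
--         return -1
--
--     def rotate_clockwise(s, steps):
--         steps %= n
--         return s[-steps:] + s[:-steps]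
--
--     def rotate_counterclockwise(s, steps):
--         steps %= n
--         return s[steps:] + s[:steps]
--
--     min_cost = float('inf')
--
--     # Try all clockwise rotations
--     for r in range(n):
--         rotated = rotate_clockwise(currentState, r)
--         rotation_cost = r * 2
--         change_cost = 0
--         valid = True
--
--         for i in range(n):
--             if rotated[i] != desiredState[i]:
--                 if alterablePositions[i] == '1':
--                     change_cost += 3
--                 else:
--                     valid = False
--                     break
--         if valid:
--             total_cost = rotation_cost + change_cost
--             min_cost = min(min_cost, total_cost)
--
--     # Try all counterclockwise rotations
--     for r in range(n):
--         rotated = rotate_counterclockwise(currentState, r)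
--         rotation_cost = r * 2
--         change_cost = 0
--         valid = True
--
--         for i in range(n):
--             if rotated[i] != desiredState[i]:
--                 if alterablePositions[i] == '1':
--                     change_cost += 3
--                 else:
--                     valid = False
--                     break
--         if valid:
--             total_cost = rotation_cost + change_cost
--             min_cost = min(min_cost, total_cost)
--
--     return min_cost if min_cost != float('inf') else -1
-- ===== SOURCE B (Python) =====
-- def min_time_to_transform(currentState, desiredState, alterablePositions):
--     n = len(currentState)
--     if len(desiredState) != n or len(alterablePositions) != n:
--         return -1
--     if any(not c.islower() for c in currentState):
--         return -1
--     if any(not c.islower() for c in desiredState):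
--         return -1
--     if any(c not in '01' for c in alterablePositions):
--         return -1
--     # Cyclic cross-correlation: instead of materialising each rotation and
--     # scanning it, count for every shift k how many positions already agree
--     # (match[k]) and how many LOCKED positions agree (lockedmatch[k]) in one
--     # pass over position pairs.  A ccw-rotation by k puts currentState[(i+k)%n]
--     # at slot i; clockwise by r is the same alignment as ccw by n-r, so every
--     # alignment is reachable at rotation cost 2*min(k, n-k).
--     match = [0] * n
--     lockedmatch = [0] * n
--     locked_total = 0
--     for i in range(n):
--         locked = alterablePositions[i] == '0'
--         if locked:
--             locked_total += 1
--         ch = desiredState[i]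
--         for j in range(n):
--             if currentState[j] == ch:
--                 k = (j - i) % n
--                 match[k] += 1
--                 if locked:
--                     lockedmatch[k] += 1
--     best = -1
--     for k in range(n):
--         if lockedmatch[k] == locked_total:
--             cost = 2 * min(k, n - k) + 3 * (n - match[k])
--             if best < 0 or cost < best:
--                 best = cost
--     return best
-- ===== Notes on version B (the rewrite author's own statement) =====
-- stated objective: alternative
-- what changed: B never materialises or scans any rotation: one pairwise pass accumulates per-shift match and locked-match histograms (a cyclic cross-correlation), and a selection pass then prices each feasible shift k directly as 2*min(k,n-k)+3*(n-match[k]), replacing A's two loops that build and scan all 2n rotated strings.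
import Mathlib
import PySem

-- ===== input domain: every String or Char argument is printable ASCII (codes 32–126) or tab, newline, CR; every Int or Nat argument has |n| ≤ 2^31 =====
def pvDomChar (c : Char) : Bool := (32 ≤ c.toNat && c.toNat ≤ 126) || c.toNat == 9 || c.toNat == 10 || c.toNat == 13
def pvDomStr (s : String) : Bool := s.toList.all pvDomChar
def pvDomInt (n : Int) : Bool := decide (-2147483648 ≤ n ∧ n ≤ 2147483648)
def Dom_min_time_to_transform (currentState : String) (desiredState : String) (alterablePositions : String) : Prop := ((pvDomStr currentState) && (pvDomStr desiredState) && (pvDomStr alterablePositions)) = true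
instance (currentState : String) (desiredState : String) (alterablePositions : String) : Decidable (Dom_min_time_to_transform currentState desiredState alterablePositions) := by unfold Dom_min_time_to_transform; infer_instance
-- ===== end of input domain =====

-- B replaces A's per-rotation string building and scanning by one pairwise pass that accumulates
-- per-shift match/locked-match histograms (a cyclic cross-correlation), then a selection pass;
-- objective: alternative.

-- ===== PORT A =====

-- Python's min(min_cost, total) where min_cost starts at float('inf'): none plays inf
def pvOptMin (mc : Option Int) (t : Int) : Option Int :=
  some (match mc with | some m => min m t | none => t)

-- inner 'for i in range(n): … break' loop of A, in lockstep over the three equal-length strings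
def pvScanA (rot des alt : List Char) (acc : Int) : Option Int :=
  match rot, des, alt with
  | r :: rs, d :: ds, a :: as_ =>
      if r ≠ d then
        (if a = '1' then pvScanA rs ds as_ (acc + 3) else none)
      else pvScanA rs ds as_ acc
  | _, _, _ => some acc

-- rotate_clockwise: s[-steps:] + s[:-steps] with steps = r % n
def pvRotCW (s : List Char) (n r : Int) : List Char :=
  let steps := PySem.Int.mod r n
  PySem.List.slice s (some (-steps)) none ++ PySem.List.slice s none (some (-steps))

-- rotate_counterclockwise: s[steps:] + s[:steps] with steps = r % n
def pvRotCCW (s : List Char) (n r : Int) : List Char :=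
  let steps := PySem.Int.mod r n
  PySem.List.slice s (some steps) none ++ PySem.List.slice s none (some steps)

def min_time_to_transform (currentState : String) (desiredState : String) (alterablePositions : String) : Int :=
  let c := currentState.toList
  let d := desiredState.toList
  let a := alterablePositions.toList
  let n : Int := (c.length : Int)
  if n ≠ (d.length : Int) ∨ n ≠ (a.length : Int) then -1
  else if ¬ (c.all PySem.Chars.islower = true) then -1
  else if ¬ (d.all PySem.Chars.islower = true) then -1
  else if ¬ (a.all (fun ch => PySem.Chars.isIn [ch] ['0', '1']) = true) then -1
  else
    let mc1 := (PySem.List.pyRange 0 n 1).foldl (fun mc r =>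
        match pvScanA (pvRotCW c n r) d a 0 with
        | some cc => pvOptMin mc (r * 2 + cc)
        | none => mc) none
    let mc2 := (PySem.List.pyRange 0 n 1).foldl (fun mc r =>
        match pvScanA (pvRotCCW c n r) d a 0 with
        | some cc => pvOptMin mc (r * 2 + cc)
        | none => mc) mc1
    match mc2 with
    | some v => v
    | none => -1

-- ===== PORT B =====

-- Python's 'arr[k] += 1' with k known in range
def pvBump (arr : List Int) (k : Int) : List Int :=
  PySem.List.pySetD arr k (PySem.List.pyGetD arr k 0 + 1)

def min_time_to_transform_alt (currentState : String) (desiredState : String) (alterablePositions : String) : Int :=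
  let c := currentState.toList
  let d := desiredState.toList
  let a := alterablePositions.toList
  let n : Int := (c.length : Int)
  if (d.length : Int) ≠ n ∨ (a.length : Int) ≠ n then -1
  else if c.any (fun ch => !PySem.Chars.islower ch) = true then -1
  else if d.any (fun ch => !PySem.Chars.islower ch) = true then -1
  else if a.any (fun ch => !PySem.Chars.isIn [ch] ['0', '1']) = true then -1
  else
    -- one pairwise pass accumulating (match, lockedmatch, locked_total)
    let st := (PySem.List.pyRange 0 n 1).foldl
      (fun (st : List Int × List Int × Int) i =>
        let locked := PySem.List.pyGetD a i ' ' = '0'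
        let st : List Int × List Int × Int := (st.1, st.2.1, if locked then st.2.2 + 1 else st.2.2)
        let ch := PySem.List.pyGetD d i ' '
        (PySem.List.pyRange 0 n 1).foldl
          (fun (st2 : List Int × List Int × Int) j =>
            if PySem.List.pyGetD c j ' ' = ch then
              let k := PySem.Int.mod (j - i) n
              (pvBump st2.1 k, (if locked then pvBump st2.2.1 k else st2.2.1), st2.2.2)
            else st2) st)
      (List.replicate c.length 0, List.replicate c.length 0, 0)
    -- selection pass over the n shifts
    (PySem.List.pyRange 0 n 1).foldl
      (fun best k =>
        if PySem.List.pyGetD st.2.1 k 0 = st.2.2 then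
          let cost := 2 * min k (n - k) + 3 * (n - PySem.List.pyGetD st.1 k 0)
          if best < 0 ∨ cost < best then cost else best
        else best) (-1)

-- ===== PRECONDITION & SPEC =====
def Spec_min_time_to_transform (currentState : String) (desiredState : String) (alterablePositions : String) (out : Int) : Prop := out = min_time_to_transform_alt currentState desiredState alterablePositions
instance (currentState : String) (desiredState : String) (alterablePositions : String) (out : Int) : Decidable (Spec_min_time_to_transform currentState desiredState alterablePositions out) := by unfold Spec_min_time_to_transform; infer_instance

-- ===== CLAIM (what is proved, stated in full; the proofs are below) =====
def Claim_equal_min_time_to_transform : Prop := ∀ (currentState : String) (desiredState : String) (alterablePositions : String), Dom_min_time_to_transform currentState desiredState alterablePositions → Spec_min_time_to_transform currentState desiredState alterablePositions (min_time_to_transform currentState desiredState alterablePositions)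

-- ===== LEMMAS AND PROOFS =====

-- Python's 'if t < b' update equals Python's min with an inf start (pvOptMin)
theorem pv_step_eq (o : Option Int) (t : Int) :
    (match o with | none => some t | some b => if t < b then some t else some b) = pvOptMin o t := by
  cases o with
  | none => rfl
  | some b =>
    unfold pvOptMin
    simp only
    split_ifs with h
    · rw [min_eq_right (le_of_lt h)]
    · rw [min_eq_left (by omega)]

theorem pv_foldl_optMin_some : ∀ (l : List Int) (a : Int), l.foldl pvOptMin (some a) = some (l.foldl min a) := by
  intro l
  induction l with
  | nil => intro a; rfl
  | cons h t ih =>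
    intro a
    simp only [List.foldl_cons]
    rw [show pvOptMin (some a) h = some (min a h) from rfl]
    exact ih _

theorem pv_foldl_optMin_none (l : List Int) : l.foldl pvOptMin none = l.min? := by
  cases l with
  | nil => rfl
  | cons a t =>
    simp only [List.foldl_cons]
    rw [show pvOptMin none a = some a from rfl, pv_foldl_optMin_some]
    rfl

theorem pv_min_dom (l m : List Int)
    (h1 : ∀ x ∈ l, ∃ y ∈ m, y ≤ x) (h2 : ∀ y ∈ m, ∃ x ∈ l, x ≤ y) :
    l.min? = m.min? := by
  cases hl : l.min? with
  | none =>
    cases hm : m.min? with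
    | none => rfl
    | some v =>
      have hv := (List.min?_eq_some_iff.mp hm).1
      obtain ⟨x, hx, -⟩ := h2 v hv
      rw [List.min?_eq_none_iff.mp hl] at hx
      simp at hx
  | some u =>
    have hu := List.min?_eq_some_iff.mp hl
    cases hm : m.min? with
    | none =>
      obtain ⟨y, hy, -⟩ := h1 u hu.1
      rw [List.min?_eq_none_iff.mp hm] at hy
      simp at hy
    | some v =>
      have hv := List.min?_eq_some_iff.mp hm
      obtain ⟨y, hy, hyu⟩ := h1 u hu.1
      obtain ⟨x, hx, hxv⟩ := h2 v hv.1
      have h3 := hv.2 y hy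
      have h4 := hu.2 x hx
      congr 1
      omega

theorem pv_foldA (g : Int → Option Int) : ∀ (l : List Int) (init : Option Int),
    l.foldl (fun mc r => match g r with | some cc => pvOptMin mc (r * 2 + cc) | none => mc) init
      = (l.filterMap (fun r => (g r).map (fun cc => r * 2 + cc))).foldl pvOptMin init := by
  intro l
  induction l with
  | nil => intro init; rfl
  | cons h t ih =>
    intro init
    cases hg : g h with
    | none => simp [List.foldl_cons, List.filterMap_cons, hg, ih]
    | some cc => simp [List.foldl_cons, List.filterMap_cons, hg, ih]

theorem pv_foldB (R : Int → List Char) (P : Int → List Char → Bool) (Q : Int → List Char → Int) :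
    ∀ (l : List Int) (init : Option Int),
    l.foldl (fun best k =>
        if P k (R k) then best
        else
          match best with
          | none => some (Q k (R k))
          | some b => if Q k (R k) < b then some (Q k (R k)) else some b) init
      = (l.filterMap (fun k => if P k (R k) then none else some (Q k (R k)))).foldl pvOptMin init := by
  intro l
  induction l with
  | nil => intro init; rfl
  | cons h t ih =>
    intro init
    by_cases hp : P h (R h) = true
    · simp only [List.foldl_cons, List.filterMap_cons, hp, if_true]
      exact ih init
    · simp only [List.foldl_cons, List.filterMap_cons, hp, Bool.false_eq_true, if_false]
      rw [pv_step_eq]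
      exact ih _

theorem pv_scanA_eq : ∀ (rot des alt : List Char) (acc : Int),
    rot.length = des.length → des.length = alt.length → (∀ ch ∈ alt, ch = '0' ∨ ch = '1') →
    pvScanA rot des alt acc =
      if ((rot.zip des).zip alt).any (fun p => p.1.1 ≠ p.1.2 ∧ p.2 = '0') then none
      else some (acc + 3 * (((rot.zip des).countP (fun p => p.1 ≠ p.2) : Nat) : Int)) := by
  intro rot
  induction rot with
  | nil => intro des alt acc h1 h2 h3; simp [pvScanA]
  | cons r rs ih =>
    intro des alt acc h1 h2 h3
    cases des with
    | nil => simp at h1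
    | cons dh dt =>
      cases alt with
      | nil => simp at h2
      | cons ah at_ =>
        have h1' : rs.length = dt.length := by simpa using h1
        have h2' : dt.length = at_.length := by simpa using h2
        have h3' : ∀ ch ∈ at_, ch = '0' ∨ ch = '1' := fun ch h => h3 ch (List.mem_cons_of_mem _ h)
        by_cases hrd : r = dh
        · rw [show pvScanA (r :: rs) (dh :: dt) (ah :: at_) acc = pvScanA rs dt at_ acc from by
            simp [pvScanA, hrd]]
          rw [ih dt at_ acc h1' h2' h3']
          simp [hrd]
        · rcases h3 ah (List.mem_cons_self) with h0 | h1''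
          · rw [show pvScanA (r :: rs) (dh :: dt) (ah :: at_) acc = none from by
              simp [pvScanA, hrd, h0]]
            simp [hrd, h0]
          · rw [show pvScanA (r :: rs) (dh :: dt) (ah :: at_) acc = pvScanA rs dt at_ (acc + 3) from by
              simp [pvScanA, hrd, h1'']]
            rw [ih dt at_ (acc + 3) h1' h2' h3']
            have hhead : (decide (r ≠ dh ∧ ah = '0')) = false := by simp [hrd, h1'']
            have hcnt : (decide (r ≠ dh)) = true := by simp [hrd]
            simp only [List.zip_cons_cons, List.any_cons, List.countP_cons, hhead, hcnt,
              Bool.false_or, if_true]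
            split_ifs with hb
            · rfl
            · congr 1
              push_cast
              ring

theorem pv_len_rotB (c : List Char) (k : Int) (h0 : 0 ≤ k) (h1 : k ≤ (c.length : Int)) :
    (PySem.List.slice c (some k) none ++ PySem.List.slice c none (some k)).length = c.length := by
  rw [PySem.List.slice_from c h0, PySem.List.slice_to c h0]
  simp
  omega

theorem pv_rotCCW_eq (c : List Char) (n r : Int) (h0 : 0 ≤ r) (h1 : r < n) :
    pvRotCCW c n r = PySem.List.slice c (some r) none ++ PySem.List.slice c none (some r) := by
  unfold pvRotCCW
  rw [PySem.Int.mod_eq_emod_of_pos (by omega), Int.emod_eq_of_lt h0 h1]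

theorem pv_rotCW_zero (c : List Char) (n : Int) (hn : 0 < n) :
    pvRotCW c n 0 = PySem.List.slice c (some 0) none ++ PySem.List.slice c none (some 0) := by
  unfold pvRotCW
  rw [PySem.Int.mod_eq_emod_of_pos hn]
  norm_num

theorem pv_rotCW_pos (c : List Char) (r : Int) (h0 : 0 < r) (h1 : r < (c.length : Int)) :
    pvRotCW c (c.length : Int) r
      = PySem.List.slice c (some ((c.length : Int) - r)) none
          ++ PySem.List.slice c none (some ((c.length : Int) - r)) := by
  have hm : PySem.Int.mod r (c.length : Int) = r := by
    rw [PySem.Int.mod_eq_emod_of_pos (by omega)]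
    exact Int.emod_eq_of_lt (by omega) h1
  unfold pvRotCW
  dsimp only
  rw [hm]
  have hr : r = ((r.toNat : Nat) : Int) := by omega
  have hpos : 0 < r.toNat := by omega
  rw [hr, PySem.List.slice_from_neg_natCast c r.toNat hpos, PySem.List.slice_to_neg_natCast c r.toNat hpos,
      PySem.List.slice_from c (show (0:Int) ≤ (c.length : Int) - ((r.toNat : Nat) : Int) by omega),
      PySem.List.slice_to c (show (0:Int) ≤ (c.length : Int) - ((r.toNat : Nat) : Int) by omega)]
  have : ((c.length : Int) - ((r.toNat : Nat) : Int)).toNat = c.length - r.toNat := by omega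
  rw [this]

-- the candidate value A's rotation loops attach to the alignment 'shift k counterclockwise'
theorem pv_fB_eq (c d a : List Char) (k : Int) (h0 : 0 ≤ k) (h1 : k < (c.length : Int))
    (hd : d.length = c.length) (ha : a.length = c.length)
    (h01 : ∀ ch ∈ a, ch = '0' ∨ ch = '1') :
    (if (((((PySem.List.slice c (some k) none ++ PySem.List.slice c none (some k))).zip d).zip a).any
          (fun p => p.1.1 ≠ p.1.2 ∧ p.2 = '0')) then (none : Option Int)
     else some (2 * min k ((c.length : Int) - k)
          + 3 * ((((PySem.List.slice c (some k) none ++ PySem.List.slice c none (some k)).zip d).countP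
                (fun p => p.1 ≠ p.2) : Nat) : Int)))
      = (pvScanA (PySem.List.slice c (some k) none ++ PySem.List.slice c none (some k)) d a 0).map
          (fun cc => 2 * min k ((c.length : Int) - k) + cc) := by
  rw [pv_scanA_eq _ _ _ 0
        (by rw [pv_len_rotB c k h0 (le_of_lt h1)]; omega)
        (by omega)
        h01]
  split_ifs with h
  · rfl
  · simp

-- A's two rotation loops compute the min over the same candidates as a single pass over the n shifts
theorem pv_core (c d a : List Char) (hd : d.length = c.length) (ha : a.length = c.length)
    (h01 : ∀ ch ∈ a, ch = '0' ∨ ch = '1') :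
    ((PySem.List.pyRange 0 (c.length : Int) 1).foldl
        (fun mc r =>
          match pvScanA (pvRotCCW c (c.length : Int) r) d a 0 with
          | some cc => pvOptMin mc (r * 2 + cc)
          | none => mc)
        ((PySem.List.pyRange 0 (c.length : Int) 1).foldl
          (fun mc r =>
            match pvScanA (pvRotCW c (c.length : Int) r) d a 0 with
            | some cc => pvOptMin mc (r * 2 + cc)
            | none => mc) none))
      = (PySem.List.pyRange 0 (c.length : Int) 1).foldl
          (fun best k =>
            if ((((PySem.List.slice c (some k) none ++ PySem.List.slice c none (some k)).zip d).zip a).any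
                  (fun p => p.1.1 ≠ p.1.2 ∧ p.2 = '0')) then best
            else
              match best with
              | none => some (2 * min k ((c.length : Int) - k)
                  + 3 * ((((PySem.List.slice c (some k) none ++ PySem.List.slice c none (some k)).zip d).countP
                        (fun p => p.1 ≠ p.2) : Nat) : Int))
              | some b =>
                if 2 * min k ((c.length : Int) - k)
                    + 3 * ((((PySem.List.slice c (some k) none ++ PySem.List.slice c none (some k)).zip d).countP
                          (fun p => p.1 ≠ p.2) : Nat) : Int) < b then
                  some (2 * min k ((c.length : Int) - k)
                    + 3 * ((((PySem.List.slice c (some k) none ++ PySem.List.slice c none (some k)).zip d).countP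
                          (fun p => p.1 ≠ p.2) : Nat) : Int))
                else some b) none := by
  rw [pv_foldA, pv_foldA, ← List.foldl_append,
      pv_foldB (fun k => PySem.List.slice c (some k) none ++ PySem.List.slice c none (some k))
        (fun _ rotated => ((rotated.zip d).zip a).any (fun p => p.1.1 ≠ p.1.2 ∧ p.2 = '0'))
        (fun k rotated => 2 * min k ((c.length : Int) - k)
          + 3 * (((rotated.zip d).countP (fun p => p.1 ≠ p.2) : Nat) : Int)),
      pv_foldl_optMin_none, pv_foldl_optMin_none]
  apply pv_min_dom
  · intro x hx
    rcases List.mem_append.mp hx with hx | hx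
    · obtain ⟨r, hr, hfr⟩ := List.mem_filterMap.mp hx
      obtain ⟨h0, h1⟩ := PySem.List.mem_pyRange_one.mp hr
      obtain ⟨cc, hS, hxv⟩ := Option.map_eq_some_iff.mp hfr
      by_cases hr0 : r = 0
      · subst hr0
        rw [pv_rotCW_zero c _ (by omega)] at hS
        refine ⟨2 * min 0 ((c.length : Int) - 0) + cc,
          List.mem_filterMap.mpr ⟨0, PySem.List.mem_pyRange_one.mpr ⟨le_refl _, by omega⟩, ?_⟩, ?_⟩
        · dsimp only
          rw [pv_fB_eq c d a 0 (by omega) (by omega) hd ha h01, hS]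
          simp
        · have := min_le_left (0 : Int) ((c.length : Int) - 0)
          omega
      · rw [pv_rotCW_pos c r (by omega) h1] at hS
        refine ⟨2 * min ((c.length : Int) - r) ((c.length : Int) - ((c.length : Int) - r)) + cc,
          List.mem_filterMap.mpr ⟨(c.length : Int) - r,
            PySem.List.mem_pyRange_one.mpr ⟨by omega, by omega⟩, ?_⟩, ?_⟩
        · dsimp only
          rw [pv_fB_eq c d a _ (by omega) (by omega) hd ha h01, hS]
          simp
        · have := min_le_right ((c.length : Int) - r) ((c.length : Int) - ((c.length : Int) - r))
          omega
    · obtain ⟨r, hr, hfr⟩ := List.mem_filterMap.mp hx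
      obtain ⟨h0, h1⟩ := PySem.List.mem_pyRange_one.mp hr
      obtain ⟨cc, hS, hxv⟩ := Option.map_eq_some_iff.mp hfr
      rw [pv_rotCCW_eq c _ r h0 h1] at hS
      refine ⟨2 * min r ((c.length : Int) - r) + cc, List.mem_filterMap.mpr ⟨r, hr, ?_⟩, ?_⟩
      · dsimp only
        rw [pv_fB_eq c d a r h0 h1 hd ha h01, hS]
        simp
      · have := min_le_left r ((c.length : Int) - r)
        omega
  · intro y hy
    obtain ⟨k, hk, hfk⟩ := List.mem_filterMap.mp hy
    obtain ⟨h0, h1⟩ := PySem.List.mem_pyRange_one.mp hk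
    rw [pv_fB_eq c d a k h0 h1 hd ha h01] at hfk
    obtain ⟨cc, hS, hyv⟩ := Option.map_eq_some_iff.mp hfk
    rcases le_or_gt k ((c.length : Int) - k) with hmin | hmin
    · refine ⟨k * 2 + cc, List.mem_append.mpr (Or.inr (List.mem_filterMap.mpr ⟨k, hk, ?_⟩)), ?_⟩
      · rw [pv_rotCCW_eq c _ k h0 h1, hS]
        simp
      · have := min_eq_left hmin
        omega
    · refine ⟨((c.length : Int) - k) * 2 + cc,
        List.mem_append.mpr (Or.inl (List.mem_filterMap.mpr ⟨(c.length : Int) - k,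
          PySem.List.mem_pyRange_one.mpr ⟨by omega, by omega⟩, ?_⟩)), ?_⟩
      · rw [pv_rotCW_pos c _ (by omega) (by omega),
          show (c.length : Int) - ((c.length : Int) - k) = k by ring, hS]
        simp
      · have := min_eq_right (le_of_lt hmin)
        omega

-- the three validation tests of B are the negations of A's
theorem pv_any_not_all (l : List Char) (p : Char → Bool) :
    ((l.any fun ch => !p ch) = true) ↔ ¬ (l.all p = true) := by
  rw [← List.not_all_eq_any_not]
  cases l.all p <;> simp

-- ---------- B-side: histogram characterisation ----------

-- x % n for x < 2n
theorem pv_mod2 (x n : Nat) (hn : 0 < n) (h : x < 2 * n) :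
    x % n = if x < n then x else x - n := by
  split_ifs with hx
  · exact Nat.mod_eq_of_lt hx
  · rw [Nat.mod_eq_sub_mod (by omega), Nat.mod_eq_of_lt (by omega)]

-- Python's (j - i) % n on in-range Nat data
theorem pv_mod_cast (i j n : Nat) (hi : i < n) :
    PySem.Int.mod ((j : Int) - (i : Int)) (n : Int) = (((j + n - i) % n : Nat) : Int) := by
  rw [PySem.Int.mod_eq_emod_of_pos (by exact_mod_cast Nat.lt_of_le_of_lt (Nat.zero_le i) hi)]
  have h1 : (j : Int) - (i : Int) = ((j + n - i : Nat) : Int) - (n : Int) := by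
    push_cast [Nat.le_of_lt hi]
    omega
  rw [h1, Int.sub_emod_right]
  exact_mod_cast (Int.natCast_emod (j + n - i) n).symm

theorem pv_length_bump (arr : List Int) (k : Nat) :
    (pvBump arr ((k : Nat) : Int)).length = arr.length := by
  unfold pvBump
  rw [PySem.List.pySetD_natCast]
  simp

theorem pv_getD_bump (arr : List Int) (k t : Nat) (hk : k < arr.length) :
    (pvBump arr ((k : Nat) : Int)).getD t 0 = if t = k then arr.getD t 0 + 1 else arr.getD t 0 := by
  unfold pvBump
  rw [PySem.List.pySetD_natCast, PySem.List.pyGetD_natCast]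
  rw [List.getD_eq_getElem?_getD, List.getElem?_set, List.getD_eq_getElem?_getD]
  split_ifs with h1 h2 h3
  · subst h1; simp [List.getElem?_eq_getElem hk]
  · omega
  · omega
  · rfl

-- count, over all positions, of matches at (counterclockwise) shift k
def pvM (c d : List Char) (k : Nat) : Nat :=
  (List.range c.length).countP (fun i => decide (c.getD ((i + k) % c.length) ' ' = d.getD i ' '))

-- the same count restricted to locked positions
def pvL (c d a : List Char) (k : Nat) : Nat :=
  (List.range c.length).countP
    (fun i => decide (a.getD i ' ' = '0') && decide (c.getD ((i + k) % c.length) ' ' = d.getD i ' '))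

-- number of locked positions
def pvT (c a : List Char) : Nat :=
  (List.range c.length).countP (fun i => decide (a.getD i ' ' = '0'))

-- countP of a point predicate on range
theorem pv_countP_point (n j0 : Nat) (hj0 : j0 < n) (A : Bool) :
    (List.range n).countP (fun j => decide (j = j0) && A) = if A then 1 else 0 := by
  cases A with
  | false => simp
  | true =>
    simp only [Bool.and_true, if_true]
    rw [List.countP_eq_length_filter]
    rw [show (fun j => decide (j = j0)) = (fun j => j == j0) from funext (fun j => by
      cases Nat.decEq j j0 <;> simp [*])]
    rw [List.filter_beq, List.length_replicate, List.count_range]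
    simp [hj0]

-- split a countP by a second test
theorem pv_countP_split {α : Type} (l : List α) (p q : α → Bool) :
    l.countP p = l.countP (fun x => p x && q x) + l.countP (fun x => p x && !(q x)) := by
  induction l with
  | nil => rfl
  | cons h t ih =>
    by_cases hp : p h <;> by_cases hq : q h <;> simp [hp, hq, ih] <;> omega

-- getD of replicate is the replicated value
theorem pv_getD_replicate (n k : Nat) : (List.replicate n (0 : Int)).getD k 0 = 0 := by
  rw [List.getD_eq_getElem?_getD, List.getElem?_replicate]
  split_ifs <;> rfl

-- 0/1 sums over a list are counts
theorem pv_sum_ite {α : Type} (l : List α) (p : α → Bool) :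
    (l.map (fun x => if p x then (1 : Int) else 0)).sum = (l.countP p : Int) := by
  induction l with
  | nil => rfl
  | cons h t ih =>
    by_cases hp : p h <;> simp [hp, ih] <;> omega

-- countP of a test and of its negation
theorem pv_countP_neg {α : Type} (l : List α) (p : α → Bool) :
    l.countP p + l.countP (fun x => !(p x)) = l.length := by
  induction l with
  | nil => rfl
  | cons h t ih => by_cases hp : p h <;> simp [hp] <;> omega

-- the unique j < n aligned with slot i at shift k
theorem pv_shift_iff (n i j k : Nat) (hn : 0 < n) (hi : i < n) (hj : j < n) (hk : k < n) :
    ((j + n - i) % n = k) ↔ (j = (i + k) % n) := by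
  rw [pv_mod2 _ _ hn (by omega), pv_mod2 _ _ hn (by omega)]
  split_ifs <;> omega

-- one iteration of B's inner loop
def pvInnerStep (p : Nat → Prop) [DecidablePred p] (κ : Nat → Nat) (locked : Prop)
    [Decidable locked] (st2 : List Int × List Int × Int) (j : Nat) : List Int × List Int × Int :=
  if p j then
    (pvBump st2.1 ((κ j : Nat) : Int),
     (if locked then pvBump st2.2.1 ((κ j : Nat) : Int) else st2.2.1),
     st2.2.2)
  else st2

-- one iteration of B's outer loop
def pvOuterStep (n : Nat) (p : Nat → Nat → Prop) [∀ i, DecidablePred (p i)]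
    (κ : Nat → Nat → Nat) (q : Nat → Prop) [DecidablePred q]
    (st : List Int × List Int × Int) (i : Nat) : List Int × List Int × Int :=
  (List.range n).foldl (pvInnerStep (p i) (κ i) (q i))
    (st.1, st.2.1, if q i then st.2.2 + 1 else st.2.2)

-- inner loop: each matching j bumps the unique aligned shift once
theorem pv_inner (n : Nat) (p : Nat → Prop) [DecidablePred p] (κ : Nat → Nat) (locked : Prop)
    [Decidable locked] (hκ : ∀ j, κ j < n) :
    ∀ (J : List Nat) (m L : List Int) (t : Int), m.length = n → L.length = n →
    ((J.foldl (pvInnerStep p κ locked) (m, L, t)).2.2 = t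
    ∧ (J.foldl (pvInnerStep p κ locked) (m, L, t)).1.length = n
    ∧ (J.foldl (pvInnerStep p κ locked) (m, L, t)).2.1.length = n
    ∧ (∀ k, k < n →
        (J.foldl (pvInnerStep p κ locked) (m, L, t)).1.getD k 0
          = m.getD k 0 + (J.countP (fun j => decide (p j) && decide (κ j = k)) : Int)
        ∧ (J.foldl (pvInnerStep p κ locked) (m, L, t)).2.1.getD k 0
          = L.getD k 0 + (if locked then (J.countP (fun j => decide (p j) && decide (κ j = k)) : Int) else 0))) := by
  intro J
  induction J with
  | nil => intro m L t hm hL; refine ⟨rfl, hm, hL, ?_⟩; intro k hk; simp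
  | cons j J ih =>
    intro m L t hm hL
    simp only [List.foldl_cons]
    by_cases hp : p j
    · rw [show pvInnerStep p κ locked (m, L, t) j
          = (pvBump m ((κ j : Nat) : Int), (if locked then pvBump L ((κ j : Nat) : Int) else L), t) from by
        unfold pvInnerStep; rw [if_pos hp]]
      have hm' : (pvBump m ((κ j : Nat) : Int)).length = n := by rw [pv_length_bump]; exact hm
      have hL' : (if locked then pvBump L ((κ j : Nat) : Int) else L).length = n := by
        split_ifs
        · rw [pv_length_bump]; exact hL
        · exact hL
      obtain ⟨h1, h2, h3, h4⟩ := ih (pvBump m ((κ j : Nat) : Int))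
        (if locked then pvBump L ((κ j : Nat) : Int) else L) t hm' hL'
      refine ⟨h1, h2, h3, ?_⟩
      intro k hk
      obtain ⟨e1, e2⟩ := h4 k hk
      constructor
      · rw [e1, pv_getD_bump m (κ j) k (by rw [hm]; exact hκ j), List.countP_cons]
        by_cases hkj : κ j = k
        · simp only [hp, hkj, decide_true, Bool.and_self]
          simp
          push_cast
          ring
        · simp only [hp, decide_true, hkj, decide_false, Bool.and_false,
            if_neg (fun h => hkj (h ▸ rfl) : ¬ k = κ j)]
          simp
      · rw [e2]
        by_cases hl : locked
        · simp only [if_pos hl]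
          rw [pv_getD_bump L (κ j) k (by rw [hL]; exact hκ j), List.countP_cons]
          by_cases hkj : κ j = k
          · simp only [hp, hkj, decide_true, Bool.and_self]
            simp
            push_cast
            ring
          · simp only [hp, decide_true, hkj, decide_false, Bool.and_false,
              if_neg (fun h => hkj (h ▸ rfl) : ¬ k = κ j)]
            simp
        · simp [hl]
    · rw [show pvInnerStep p κ locked (m, L, t) j = (m, L, t) from by
        unfold pvInnerStep; rw [if_neg hp]]
      obtain ⟨h1, h2, h3, h4⟩ := ih m L t hm hL
      refine ⟨h1, h2, h3, ?_⟩
      intro k hk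
      obtain ⟨e1, e2⟩ := h4 k hk
      refine ⟨?_, ?_⟩
      · rw [e1, List.countP_cons]
        simp [hp]
      · rw [e2, List.countP_cons]
        simp [hp]

-- outer loop: histograms accumulate per-position indicator counts
theorem pv_outer (n : Nat) (p : Nat → Nat → Prop) [∀ i, DecidablePred (p i)]
    (κ : Nat → Nat → Nat) (q : Nat → Prop) [DecidablePred q] (hκ : ∀ i j, κ i j < n) :
    ∀ (I : List Nat) (m L : List Int) (t : Int), m.length = n → L.length = n →
    ((I.foldl (pvOuterStep n p κ q) (m, L, t)).2.2 = t + (I.countP (fun i => decide (q i)) : Int)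
    ∧ (I.foldl (pvOuterStep n p κ q) (m, L, t)).1.length = n
    ∧ (I.foldl (pvOuterStep n p κ q) (m, L, t)).2.1.length = n
    ∧ (∀ k, k < n →
        (I.foldl (pvOuterStep n p κ q) (m, L, t)).1.getD k 0
          = m.getD k 0 + (I.map (fun i =>
              ((List.range n).countP (fun j => decide (p i j) && decide (κ i j = k)) : Int))).sum
        ∧ (I.foldl (pvOuterStep n p κ q) (m, L, t)).2.1.getD k 0
          = L.getD k 0 + (I.map (fun i => if q i then
              ((List.range n).countP (fun j => decide (p i j) && decide (κ i j = k)) : Int) else 0)).sum)) := by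
  intro I
  induction I with
  | nil => intro m L t hm hL; refine ⟨by simp, hm, hL, ?_⟩; intro k hk; simp
  | cons i I ih =>
    intro m L t hm hL
    simp only [List.foldl_cons]
    obtain ⟨g1, g2, g3, g4⟩ := pv_inner n (p i) (κ i) (q i) (hκ i) (List.range n) m L
      (if q i then t + 1 else t) hm hL
    rw [show pvOuterStep n p κ q (m, L, t) i
        = (List.range n).foldl (pvInnerStep (p i) (κ i) (q i)) (m, L, if q i then t + 1 else t) from rfl]
    obtain ⟨F1, F2, F3⟩ : _ ∧ _ ∧ _ := ⟨g1, g2, g3⟩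
    set G := (List.range n).foldl (pvInnerStep (p i) (κ i) (q i)) (m, L, if q i then t + 1 else t) with hG
    have hGp : G = (G.1, G.2.1, G.2.2) := rfl
    rw [hGp]
    obtain ⟨h1, h2, h3, h4⟩ := ih G.1 G.2.1 G.2.2 F2 F3
    refine ⟨?_, h2, h3, ?_⟩
    · rw [h1, F1, List.countP_cons]
      by_cases hq : q i <;> simp [hq] <;> push_cast <;> ring
    · intro k hk
      obtain ⟨e1, e2⟩ := h4 k hk
      obtain ⟨f1, f2⟩ := g4 k hk
      refine ⟨?_, ?_⟩
      · rw [e1, f1, List.map_cons, List.sum_cons]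
        ring
      · rw [e2, f2, List.map_cons, List.sum_cons]
        by_cases hq : q i <;> simp [hq] <;> ring

-- zip countP through indices
theorem pv_zip_countP {α β : Type} (dx : α) (dy : β) (p : α × β → Bool) :
    ∀ (x : List α) (y : List β), x.length = y.length →
    (x.zip y).countP p = (List.range x.length).countP (fun i => p (x.getD i dx, y.getD i dy)) := by
  intro x
  induction x with
  | nil => intro y h; simp
  | cons xh xt ih =>
    intro y h
    cases y with
    | nil => simp at h
    | cons yh yt =>
      have h' : xt.length = yt.length := by simpa using h
      rw [List.zip_cons_cons, List.countP_cons, ih yt h',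
          show (xh :: xt).length = xt.length + 1 from rfl,
          List.range_succ_eq_map, List.countP_cons, List.countP_map]
      rw [show ((fun i => p ((xh :: xt).getD i dx, (yh :: yt).getD i dy)) ∘ (fun k => k + 1))
          = (fun i => p (xt.getD i dx, yt.getD i dy)) from funext (fun i => by simp)]
      simp [Nat.add_comm]

-- zip-zip any through indices
theorem pv_zip3_any {α β γ : Type} (dx : α) (dy : β) (dz : γ) (q : (α × β) × γ → Bool) :
    ∀ (x : List α) (y : List β) (z : List γ), x.length = y.length → y.length = z.length →
    ((x.zip y).zip z).any q
      = (List.range x.length).any (fun i => q ((x.getD i dx, y.getD i dy), z.getD i dz)) := by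
  intro x
  induction x with
  | nil => intro y z h1 h2; simp
  | cons xh xt ih =>
    intro y z h1 h2
    cases y with
    | nil => simp at h1
    | cons yh yt =>
      cases z with
      | nil => simp at h2
      | cons zh zt =>
        rw [List.zip_cons_cons, List.zip_cons_cons, List.any_cons,
            ih yt zt (by simpa using h1) (by simpa using h2),
            show (xh :: xt).length = xt.length + 1 from rfl,
            List.range_succ_eq_map, List.any_cons, List.any_map]
        rw [show ((fun i => q (((xh :: xt).getD i dx, (yh :: yt).getD i dy), (zh :: zt).getD i dz)) ∘ (fun k => k + 1))
            = (fun i => q ((xt.getD i dx, yt.getD i dy), zt.getD i dz)) from funext (fun i => by simp)]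
        rfl

-- indexing a rotation
theorem pv_rot_getD (c : List Char) (k i : Nat) (hk : k < c.length) (hi : i < c.length) :
    (c.drop k ++ c.take k).getD i ' ' = c.getD ((i + k) % c.length) ' ' := by
  have hdl : (c.drop k).length = c.length - k := List.length_drop ..
  rw [List.getD_eq_getElem?_getD, List.getD_eq_getElem?_getD]
  by_cases h : i < c.length - k
  · rw [List.getElem?_append_left (by omega), List.getElem?_drop,
        Nat.mod_eq_of_lt (by omega), Nat.add_comm]
  · rw [List.getElem?_append_right (by omega), hdl]
    have hm : (i + k) % c.length = i + k - c.length := by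
      rw [Nat.mod_eq_sub_mod (by omega), Nat.mod_eq_of_lt (by omega)]
    rw [hm, List.getElem?_take, if_pos (by omega)]
    congr 2
    omega

-- Python's running best with the -1 sentinel is the optional running min
def pvRep : Option Int → Int
  | none => -1
  | some m => m

theorem pv_sentinel (q : Int → Prop) [DecidablePred q] (cost : Int → Int) :
    ∀ (ks : List Int), (∀ k ∈ ks, q k → 0 ≤ cost k) → ∀ (o : Option Int), (∀ m, o = some m → 0 ≤ m) →
    ks.foldl (fun best k => if q k then (if best < 0 ∨ cost k < best then cost k else best) else best)
        (pvRep o)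
      = pvRep (ks.foldl (fun mc k => if q k then pvOptMin mc (cost k) else mc) o) := by
  intro ks
  induction ks with
  | nil => intro _ o _; rfl
  | cons k t ih =>
    intro hc o ho
    simp only [List.foldl_cons]
    by_cases hq : q k
    · rw [if_pos hq, if_pos hq]
      have hck : 0 ≤ cost k := hc k List.mem_cons_self hq
      have step : (if pvRep o < 0 ∨ cost k < pvRep o then cost k else pvRep o)
          = pvRep (pvOptMin o (cost k)) := by
        cases o with
        | none => simp [pvRep, pvOptMin]
        | some m =>
          have hm : 0 ≤ m := ho m rfl
          simp only [pvRep, pvOptMin]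
          split_ifs with h
          · rcases h with h | h
            · omega
            · rw [min_eq_right (le_of_lt h)]
          · push Not at h
            rw [min_eq_left (by omega)]
      rw [step]
      apply ih (fun k hk => hc k (List.mem_cons_of_mem _ hk))
      intro m hm
      cases o with
      | none => simp [pvOptMin] at hm; omega
      | some m' =>
        have := ho m' rfl
        simp [pvOptMin] at hm
        have := min_le_left m' (cost k)
        omega
    · rw [if_neg hq, if_neg hq]
      exact ih (fun k hk => hc k (List.mem_cons_of_mem _ hk)) o ho

-- the per-position indicator behind the histograms: the unique aligned source position
theorem pv_cnt_spec (c d : List Char) (i k : Nat) (hi : i < c.length) (hk : k < c.length) :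
    (List.range c.length).countP
        (fun j => decide (c.getD j ' ' = d.getD i ' ') && decide ((j + c.length - i) % c.length = k))
      = if decide (c.getD ((i + k) % c.length) ' ' = d.getD i ' ') then 1 else 0 := by
  have hn0 : 0 < c.length := by omega
  rw [List.countP_congr (p := fun j => decide (c.getD j ' ' = d.getD i ' ') && decide ((j + c.length - i) % c.length = k))
      (q := fun j => decide (j = (i + k) % c.length) && decide (c.getD ((i + k) % c.length) ' ' = d.getD i ' '))
      (fun j hj => by
        have hj' : j < c.length := List.mem_range.mp hj
        simp only [Bool.and_eq_true, decide_eq_true_eq]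
        constructor
        · rintro ⟨hc, hm⟩
          have hjj := (pv_shift_iff c.length i j k hn0 hi hj' hk).mp hm
          exact ⟨hjj, hjj ▸ hc⟩
        · rintro ⟨hj0, hc⟩
          exact ⟨hj0 ▸ hc, (pv_shift_iff c.length i j k hn0 hi hj' hk).mpr hj0⟩)]
  exact pv_countP_point c.length ((i + k) % c.length) (Nat.mod_lt _ hn0) _

-- 'match o with …' with the -1 default is pvRep
theorem pv_matchRep (o : Option Int) :
    (match o with | some v => v | none => (-1 : Int)) = pvRep o := by
  cases o <;> rfl

-- B's candidate cost at shift k equals A's candidate cost for the same alignment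
theorem pv_bridge_cost (c d : List Char) (hd : d.length = c.length)
    (ST : List Int × List Int × Int)
    (S4 : ∀ k, k < c.length → ST.1.getD k 0 = (pvM c d k : Int))
    (k : Int) (hk0 : 0 ≤ k) (hk1 : k < (c.length : Int)) :
    2 * min k ((c.length : Int) - k)
        + 3 * ((((PySem.List.slice c (some k) none ++ PySem.List.slice c none (some k)).zip d).countP
              (fun p => p.1 ≠ p.2) : Nat) : Int)
      = 2 * min k ((c.length : Int) - k) + 3 * ((c.length : Int) - PySem.List.pyGetD ST.1 k 0) := by
  obtain ⟨k', rfl⟩ : ∃ k' : Nat, k = (k' : Int) := ⟨k.toNat, by omega⟩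
  have hk' : k' < c.length := by exact_mod_cast hk1
  rw [PySem.List.slice_from_natCast, PySem.List.slice_to_natCast]
  have hlen : (c.drop k' ++ c.take k').length = c.length := by
    rw [List.length_append, List.length_drop, List.length_take]
    omega
  rw [pv_zip_countP ' ' ' ' _ (c.drop k' ++ c.take k') d (by rw [hlen, hd]), hlen]
  rw [List.countP_congr (q := fun i => !(decide (c.getD ((i + k') % c.length) ' ' = d.getD i ' ')))
      (fun i hi => by
        rw [pv_rot_getD c k' i hk' (List.mem_range.mp hi)]
        simp)]
  have hneg := pv_countP_neg (List.range c.length)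
    (fun i => decide (c.getD ((i + k') % c.length) ' ' = d.getD i ' '))
  rw [List.length_range] at hneg
  have hMle : pvM c d k' ≤ c.length := by
    have := List.countP_le_length
      (p := fun i => decide (c.getD ((i + k') % c.length) ' ' = d.getD i ' '))
      (l := List.range c.length)
    simpa [pvM] using this
  rw [PySem.List.pyGetD_natCast, S4 k' hk']
  have : ((List.range c.length).countP
      (fun i => !(decide (c.getD ((i + k') % c.length) ' ' = d.getD i ' '))) : Int)
      = (c.length : Int) - (pvM c d k' : Int) := by
    unfold pvM
    omega
  rw [this]

-- A's validity test at shift k is B's locked-histogram test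
theorem pv_bridge_any (c d a : List Char) (hd : d.length = c.length) (ha : a.length = c.length)
    (ST : List Int × List Int × Int) (S3 : ST.2.2 = (pvT c a : Int))
    (S4 : ∀ k, k < c.length → ST.2.1.getD k 0 = (pvL c d a k : Int))
    (k : Int) (hk0 : 0 ≤ k) (hk1 : k < (c.length : Int)) :
    ((((PySem.List.slice c (some k) none ++ PySem.List.slice c none (some k)).zip d).zip a).any
        (fun p => p.1.1 ≠ p.1.2 ∧ p.2 = '0') = false)
      ↔ PySem.List.pyGetD ST.2.1 k 0 = ST.2.2 := by
  obtain ⟨k', rfl⟩ : ∃ k' : Nat, k = (k' : Int) := ⟨k.toNat, by omega⟩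
  have hk' : k' < c.length := by exact_mod_cast hk1
  rw [PySem.List.slice_from_natCast, PySem.List.slice_to_natCast]
  have hlen : (c.drop k' ++ c.take k').length = c.length := by
    rw [List.length_append, List.length_drop, List.length_take]
    omega
  rw [pv_zip3_any ' ' ' ' ' ' _ (c.drop k' ++ c.take k') d a (by rw [hlen, hd]) (by omega), hlen]
  rw [PySem.List.pyGetD_natCast, S4 k' hk', S3, Int.natCast_inj]
  have hsplit : pvT c a = pvL c d a k'
      + (List.range c.length).countP (fun i => decide (a.getD i ' ' = '0')
          && !(decide (c.getD ((i + k') % c.length) ' ' = d.getD i ' '))) := by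
    unfold pvT pvL
    exact pv_countP_split (List.range c.length) _
      (fun i => decide (c.getD ((i + k') % c.length) ' ' = d.getD i ' '))
  rw [List.any_eq_false]
  constructor
  · intro hall
    have hz : (List.range c.length).countP (fun i => decide (a.getD i ' ' = '0')
        && !(decide (c.getD ((i + k') % c.length) ' ' = d.getD i ' '))) = 0 := by
      rw [List.countP_eq_zero]
      intro i hi
      have hrot := pv_rot_getD c k' i hk' (List.mem_range.mp hi)
      have := hall i hi
      rw [hrot] at this
      simp only [Bool.and_eq_true, Bool.not_eq_true', decide_eq_false_iff_not,
        decide_eq_true_eq] at this ⊢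
      tauto
    omega
  · intro heq i hi
    have hz : (List.range c.length).countP (fun i => decide (a.getD i ' ' = '0')
        && !(decide (c.getD ((i + k') % c.length) ' ' = d.getD i ' '))) = 0 := by omega
    rw [List.countP_eq_zero] at hz
    have := hz i hi
    have hrot := pv_rot_getD c k' i hk' (List.mem_range.mp hi)
    rw [hrot]
    simp only [Bool.and_eq_true, Bool.not_eq_true', decide_eq_false_iff_not,
      decide_eq_true_eq] at this ⊢
    tauto

-- the pairwise pass computes exactly the three histogram quantities
theorem pv_ST (c d a : List Char) (hd : d.length = c.length) (ha : a.length = c.length) :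
    ∀ ST : List Int × List Int × Int,
    ST = List.foldl
        (fun (st : List Int × List Int × Int) i =>
          List.foldl
            (fun (st2 : List Int × List Int × Int) j =>
              if PySem.List.pyGetD c j ' ' = PySem.List.pyGetD d i ' ' then
                (pvBump st2.1 (PySem.Int.mod (j - i) (c.length : Int)),
                 if PySem.List.pyGetD a i ' ' = '0' then
                   pvBump st2.2.1 (PySem.Int.mod (j - i) (c.length : Int))
                 else st2.2.1,
                 st2.2.2)
              else st2)
            (st.1, st.2.1, if PySem.List.pyGetD a i ' ' = '0' then st.2.2 + 1 else st.2.2)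
            (PySem.List.pyRange 0 (c.length : Int) 1))
        (List.replicate c.length 0, List.replicate c.length 0, 0)
        (PySem.List.pyRange 0 (c.length : Int) 1) →
    ST.1.length = c.length ∧ ST.2.1.length = c.length ∧ ST.2.2 = (pvT c a : Int)
    ∧ (∀ k, k < c.length → ST.1.getD k 0 = (pvM c d k : Int) ∧ ST.2.1.getD k 0 = (pvL c d a k : Int)) := by
  intro ST hST
  rw [PySem.List.pyRange_zero_nat, List.foldl_map] at hST
  rcases Nat.eq_zero_or_pos c.length with h0 | h0
  · rw [h0] at hST
    simp only [List.range_zero, List.foldl_nil, List.replicate_zero] at hST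
    subst hST
    refine ⟨by simp [h0], by simp [h0], by simp [pvT, h0], ?_⟩
    intro k hk
    omega
  rw [PySem.List.foldl_congr_mem _ _
      (pvOuterStep c.length
        (fun i j => c.getD j ' ' = d.getD i ' ')
        (fun i j => (j + c.length - i) % c.length)
        (fun i => a.getD i ' ' = '0')) _
      (by
        intro st i hi
        have hi' : i < c.length := List.mem_range.mp hi
        unfold pvOuterStep
        simp only [PySem.List.pyGetD_natCast]
        rw [List.foldl_map]
        apply PySem.List.foldl_congr_mem
        intro st2 j hj
        unfold pvInnerStep
        simp only [PySem.List.pyGetD_natCast]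
        rw [pv_mod_cast i j c.length hi'])] at hST
  obtain ⟨F1, F2, F3, F4⟩ := pv_outer c.length
    (fun i j => c.getD j ' ' = d.getD i ' ')
    (fun i j => (j + c.length - i) % c.length)
    (fun i => a.getD i ' ' = '0')
    (fun i j => Nat.mod_lt _ h0)
    (List.range c.length)
    (List.replicate c.length 0) (List.replicate c.length 0) 0
    (List.length_replicate) (List.length_replicate)
  rw [← hST] at F1 F2 F3 F4
  refine ⟨F2, F3, by rw [F1]; simp [pvT], ?_⟩
  intro k hk
  obtain ⟨e1, e2⟩ := F4 k hk
  constructor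
  · rw [e1, pv_getD_replicate,
        List.map_congr_left (fun i hi => by
          rw [pv_cnt_spec c d i k (List.mem_range.mp hi) hk, Nat.cast_ite, Nat.cast_one, Nat.cast_zero]),
        pv_sum_ite]
    simp [pvM]
  · have hcongr : List.map
        (fun i => if a.getD i ' ' = '0' then
            (((List.range c.length).countP (fun j => decide (c.getD j ' ' = d.getD i ' ')
              && decide ((j + c.length - i) % c.length = k)) : Nat) : Int)
          else 0) (List.range c.length)
        = List.map (fun i => if (decide (a.getD i ' ' = '0')
            && decide (c.getD ((i + k) % c.length) ' ' = d.getD i ' ')) = true then (1 : Int) else 0)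
          (List.range c.length) := by
      apply List.map_congr_left
      intro i hi
      rw [pv_cnt_spec c d i k (List.mem_range.mp hi) hk, Nat.cast_ite, Nat.cast_one, Nat.cast_zero]
      by_cases hq : a.getD i ' ' = '0'
      · rw [if_pos hq]
        by_cases hb : c.getD ((i + k) % c.length) ' ' = d.getD i ' '
        · rw [if_pos (by simp only [decide_eq_true_eq]; exact hb),
              if_pos (by simp only [Bool.and_eq_true, decide_eq_true_eq]; exact ⟨hq, hb⟩)]
        · rw [if_neg (by simp only [decide_eq_true_eq]; exact hb),
              if_neg (by simp only [Bool.and_eq_true, decide_eq_true_eq]; exact fun h => hb h.2)]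
      · rw [if_neg hq, if_neg (by simp only [Bool.and_eq_true, decide_eq_true_eq]; exact fun h => hq h.1)]
    rw [e2, pv_getD_replicate, hcongr, pv_sum_ite]
    simp [pvL]

-- ===== VERDICT (by name: the statement is the Claim_ definition above) =====
theorem min_time_to_transform_spec : Claim_equal_min_time_to_transform := by
  intro cs ds as _
  unfold Spec_min_time_to_transform min_time_to_transform min_time_to_transform_alt
  dsimp only
  by_cases hlen : ((cs.toList.length : Int) ≠ (ds.toList.length : Int) ∨ (cs.toList.length : Int) ≠ (as.toList.length : Int))
  · rw [if_pos hlen, if_pos (Or.imp Ne.symm Ne.symm hlen)]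
  · rw [if_neg hlen, if_neg (fun hh => hlen (Or.imp Ne.symm Ne.symm hh))]
    push Not at hlen
    obtain ⟨hd', ha'⟩ := hlen
    by_cases hc1 : cs.toList.all PySem.Chars.islower = true
    case neg =>
      rw [if_pos hc1, if_pos ((pv_any_not_all _ _).mpr hc1)]
    case pos =>
      rw [if_neg (not_not_intro hc1), if_neg (fun hh => (pv_any_not_all _ _).mp hh hc1)]
      by_cases hc2 : ds.toList.all PySem.Chars.islower = true
      case neg =>
        rw [if_pos hc2, if_pos ((pv_any_not_all _ _).mpr hc2)]
      case pos =>
        rw [if_neg (not_not_intro hc2), if_neg (fun hh => (pv_any_not_all _ _).mp hh hc2)]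
        by_cases hc3 : as.toList.all (fun ch => PySem.Chars.isIn [ch] ['0', '1']) = true
        case neg =>
          rw [if_pos hc3, if_pos ((pv_any_not_all _ _).mpr hc3)]
        case pos =>
          rw [if_neg (not_not_intro hc3), if_neg (fun hh => (pv_any_not_all _ _).mp hh hc3)]
          have hd : ds.toList.length = cs.toList.length := by omega
          have ha : as.toList.length = cs.toList.length := by omega
          have h01 : ∀ ch ∈ as.toList, ch = '0' ∨ ch = '1' := by
            intro ch hch
            have h := List.all_eq_true.mp hc3 ch hch
            rw [PySem.Chars.isIn_iff_infix] at h
            have hm := (List.singleton_infix_iff ch _).mp h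
            simpa using hm
          by_cases hn0 : cs.toList.length = 0
          · rw [show PySem.List.pyRange 0 ((cs.toList.length : Nat) : Int) 1 = [] from
              PySem.List.pyRange_one_eq_nil (by omega)]
            simp only [List.foldl_nil]
          · rw [pv_core cs.toList ds.toList as.toList hd ha h01]
            set ST := List.foldl
                (fun (st : List Int × List Int × Int) i =>
                  List.foldl
                    (fun (st2 : List Int × List Int × Int) j =>
                      if PySem.List.pyGetD cs.toList j ' ' = PySem.List.pyGetD ds.toList i ' ' then
                        (pvBump st2.1 (PySem.Int.mod (j - i) (cs.toList.length : Int)),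
                         if PySem.List.pyGetD as.toList i ' ' = '0' then
                           pvBump st2.2.1 (PySem.Int.mod (j - i) (cs.toList.length : Int))
                         else st2.2.1,
                         st2.2.2)
                      else st2)
                    (st.1, st.2.1, if PySem.List.pyGetD as.toList i ' ' = '0' then st.2.2 + 1 else st.2.2)
                    (PySem.List.pyRange 0 (cs.toList.length : Int) 1))
                (List.replicate cs.toList.length 0, List.replicate cs.toList.length 0, 0)
                (PySem.List.pyRange 0 (cs.toList.length : Int) 1) with hST
            obtain ⟨S1, S2, S3, S4⟩ := pv_ST cs.toList ds.toList as.toList hd ha ST hST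
            rw [pv_matchRep]
            have hsent := pv_sentinel
              (fun k => PySem.List.pyGetD ST.2.1 k 0 = ST.2.2)
              (fun k => 2 * min k ((cs.toList.length : Int) - k)
                + 3 * ((cs.toList.length : Int) - PySem.List.pyGetD ST.1 k 0))
              (PySem.List.pyRange 0 (cs.toList.length : Int) 1)
              (by
                intro k hk _
                obtain ⟨hk0, hk1⟩ := PySem.List.mem_pyRange_one.mp hk
                obtain ⟨k', rfl⟩ : ∃ k' : Nat, k = (k' : Int) := ⟨k.toNat, by omega⟩
                have hk' : k' < cs.toList.length := by exact_mod_cast hk1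
                dsimp only
                rw [PySem.List.pyGetD_natCast, (S4 k' hk').1]
                have hMle : pvM cs.toList ds.toList k' ≤ cs.toList.length := by
                  have := List.countP_le_length
                    (p := fun i => decide (cs.toList.getD ((i + k') % cs.toList.length) ' '
                      = ds.toList.getD i ' '))
                    (l := List.range cs.toList.length)
                  simpa [pvM] using this
                have h1 : (0 : Int) ≤ min (k' : Int) ((cs.toList.length : Int) - (k' : Int)) := by
                  apply le_min <;> omega
                omega)
              none (by intro m hm; exact absurd hm (by simp))
            rw [show (-1 : Int) = pvRep none from rfl, hsent]
            congr 1
            apply PySem.List.foldl_congr_mem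
            intro best k hk
            obtain ⟨hk0, hk1⟩ := PySem.List.mem_pyRange_one.mp hk
            have hbc := pv_bridge_cost cs.toList ds.toList hd ST (fun k hk => (S4 k hk).1) k hk0 hk1
            have hba := pv_bridge_any cs.toList ds.toList as.toList hd ha ST S3
              (fun k hk => (S4 k hk).2) k hk0 hk1
            by_cases hq : PySem.List.pyGetD ST.2.1 k 0 = ST.2.2
            · have hany := hba.mpr hq
              rw [if_pos hq, if_neg (by rw [hany]; exact Bool.false_ne_true), pv_step_eq, hbc]
            · have hany : ((((PySem.List.slice cs.toList (some k) none
                  ++ PySem.List.slice cs.toList none (some k)).zip ds.toList).zip as.toList).any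
                    (fun p => p.1.1 ≠ p.1.2 ∧ p.2 = '0')) = true := by
                cases h : ((((PySem.List.slice cs.toList (some k) none
                    ++ PySem.List.slice cs.toList none (some k)).zip ds.toList).zip as.toList).any
                      (fun p => p.1.1 ≠ p.1.2 ∧ p.2 = '0')) with
                | false => exact absurd (hba.mp h) hq
                | true => rfl
              rw [if_neg hq, if_pos hany]
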